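-- pv_equiv track=rewrite | github.com/linhcly/codecademy | portfolio-projects/US-medical-insurance/medical_analysis.py | gender_count
-- ===== SOURCE A (Python) =====
-- def gender_count(sex_list):
--     female = 0
--     male = 0
--     for n in sex_list:
--       if n == "male":
--          male += 1
--       else:
--          female += 1
--     return "female count: "+str(female),"male count: "+str(male)
-- ===== SOURCE B (Python) =====
-- def _counts(lst):
--     # divide-and-conquer: (female, male) counts of lst
--     if not lst:
--         return (0, 0)
--     if len(lst) == 1:
--         return (0, 1) if lst[0] == "male" else (1, 0)
--     mid = len(lst) // 2
--     f1, m1 = _counts(lst[:mid])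
--     f2, m2 = _counts(lst[mid:])
--     return (f1 + f2, m1 + m2)
--
-- def gender_count(sex_list):
--     female, male = _counts(sex_list)
--     return "female count: "+str(female),"male count: "+str(male)
-- ===== Notes on version B (the rewrite author's own statement) =====
-- stated objective: alternative
-- what changed: Replaces the single branch-per-element counting loop with a recursive divide-and-conquer helper that splits the list in halves, computes (female, male) pairs for each half and adds them.
import Mathlib
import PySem

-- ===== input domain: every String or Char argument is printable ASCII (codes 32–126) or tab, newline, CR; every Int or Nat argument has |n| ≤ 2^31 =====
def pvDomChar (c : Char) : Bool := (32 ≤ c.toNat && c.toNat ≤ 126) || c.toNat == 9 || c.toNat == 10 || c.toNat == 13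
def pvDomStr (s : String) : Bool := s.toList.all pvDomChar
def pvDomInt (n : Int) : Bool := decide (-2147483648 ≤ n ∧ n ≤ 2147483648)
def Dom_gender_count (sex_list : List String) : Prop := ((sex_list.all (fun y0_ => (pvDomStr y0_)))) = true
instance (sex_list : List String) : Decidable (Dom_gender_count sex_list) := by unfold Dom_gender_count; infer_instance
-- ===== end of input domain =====

-- B: recursive divide-and-conquer counting instead of A's branch-per-element loop (alternative decomposition; return value identical).

-- ===== PORT A =====
-- literal port: loop over the list maintaining (female, male) counters, branch per element
def gender_count (sex_list : List String) : String × String :=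
  let fm := sex_list.foldl (fun (acc : Int × Int) n =>
    if n == "male" then (acc.1, acc.2 + 1) else (acc.1 + 1, acc.2)) (0, 0)
  ("female count: " ++ PySem.Int.toStr fm.1, "male count: " ++ PySem.Int.toStr fm.2)

-- ===== PORT B =====
-- port of _counts: the Python slices lst[:mid] / lst[mid:] with 0 ≤ mid ≤ len(lst) are exactly
-- List.take mid / List.drop mid, and len(lst)//2 on a nonnegative length is exactly Nat division.
def gcCounts : List String → Int × Int
  | [] => (0, 0)
  | [x] => if x == "male" then (0, 1) else (1, 0)
  | a :: b :: rest =>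
    let l := a :: b :: rest
    let mid := l.length / 2
    let p1 := gcCounts (l.take mid)
    let p2 := gcCounts (l.drop mid)
    (p1.1 + p2.1, p1.2 + p2.2)
termination_by l => l.length
decreasing_by
  · simp [List.length_take]; omega
  · simp [List.length_drop]; omega

def gender_count_alt (sex_list : List String) : String × String :=
  let fm := gcCounts sex_list
  ("female count: " ++ PySem.Int.toStr fm.1, "male count: " ++ PySem.Int.toStr fm.2)

-- ===== PRECONDITION & SPEC =====
def Spec_gender_count (sex_list : List String) (out : String × String) : Prop := out = gender_count_alt sex_list
instance (sex_list : List String) (out : String × String) : Decidable (Spec_gender_count sex_list out) := by unfold Spec_gender_count; infer_instance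

-- ===== CLAIM (what is proved, stated in full; the proofs are below) =====
def Claim_equal_gender_count : Prop := ∀ (sex_list : List String), Dom_gender_count sex_list → Spec_gender_count sex_list (gender_count sex_list)

-- ===== LEMMAS AND PROOFS =====
theorem gender_count_foldl (l : List String) (f m : Int) :
    l.foldl (fun (acc : Int × Int) n =>
      if n == "male" then (acc.1, acc.2 + 1) else (acc.1 + 1, acc.2)) (f, m)
    = (f + ((l.length : Int) - (l.count "male" : Int)), m + (l.count "male" : Int)) := by
  induction l generalizing f m with
  | nil => simp
  | cons x xs ih =>
    simp only [List.foldl_cons]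
    by_cases h : x == "male" <;>
      simp only [h, if_pos, if_neg, Bool.false_eq_true, not_false_iff] <;>
      rw [ih] <;> simp [List.count_cons, h, Prod.ext_iff] <;> omega

theorem gcCounts_eq_aux (n : Nat) : ∀ (l : List String), l.length ≤ n →
    gcCounts l = ((l.length : Int) - (l.count "male" : Int), (l.count "male" : Int)) := by
  induction n with
  | zero =>
    intro l hl
    have : l = [] := List.eq_nil_of_length_eq_zero (Nat.le_zero.mp hl)
    subst this; simp [gcCounts]
  | succ n ih =>
    intro l hl
    match l with
    | [] => simp [gcCounts]
    | [x] => by_cases h : x == "male" <;> simp [gcCounts, h, List.count_cons]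
    | a :: b :: rest =>
      rw [gcCounts]
      simp only [List.length_cons] at hl
      have h1 : ((a :: b :: rest).take ((a :: b :: rest).length / 2)).length ≤ n := by
        simp [List.length_take, List.length_cons]; omega
      have h2 : ((a :: b :: rest).drop ((a :: b :: rest).length / 2)).length ≤ n := by
        simp [List.length_drop, List.length_cons]; omega
      rw [ih _ h1, ih _ h2]
      have hc : ((a :: b :: rest).take ((a :: b :: rest).length / 2)).count "male"
          + ((a :: b :: rest).drop ((a :: b :: rest).length / 2)).count "male"
          = (a :: b :: rest).count "male" := by
        rw [← List.count_append, List.take_append_drop]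
      have hle : ((a :: b :: rest).take ((a :: b :: rest).length / 2)).length
          + ((a :: b :: rest).drop ((a :: b :: rest).length / 2)).length
          = (a :: b :: rest).length := by
        rw [← List.length_append, List.take_append_drop]
      simp only [Prod.mk.injEq]
      constructor <;> omega

theorem gcCounts_eq (l : List String) :
    gcCounts l = ((l.length : Int) - (l.count "male" : Int), (l.count "male" : Int)) :=
  gcCounts_eq_aux l.length l le_rfl

-- ===== VERDICT (by name: the statement is the Claim_ definition above) =====
theorem gender_count_spec : Claim_equal_gender_count := by
  intro sex_list _
  unfold Spec_gender_count gender_count gender_count_alt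
  rw [gender_count_foldl, gcCounts_eq]
  simp
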